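-- pv_equiv track=rewrite | github.com/maodev01/Dashboard-Covid-19-V2 | app/services.py | process_locations
-- ===== SOURCE A (Python) =====
-- def process_locations(data):
--     locations = {}
--     for case in data:
--         dept = case.get('departamento_nom')
--         city = case.get('ciudad_municipio_nom')
--         if dept and city:
--             if dept not in locations:
--                 locations[dept] = set()
--             locations[dept].add(city)
--
--     # Convert sets to lists
--     return {k: sorted(list(v)) for k, v in locations.items()}
-- ===== SOURCE B (Python) =====
-- def process_locations(data):
--     # One filtered pair list, depts deduped in first-seen order, then a
--     # per-department scan builds each sorted city set.
--     raw = [(c.get('departamento_nom'), c.get('ciudad_municipio_nom')) for c in data]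
--     pairs = [(d, c) for d, c in raw if d and c]
--     depts = dict.fromkeys(d for d, _ in pairs)
--     return {d: sorted({c for dd, c in pairs if dd == d}) for d in depts}
-- ===== Notes on version B (the rewrite author's own statement) =====
-- stated objective: alternative
-- what changed: Replaces the single pass maintaining a dict of mutable sets with a filtered pair list, an ordered dedup of departments, and a per-department scan building each sorted city set.
import Mathlib
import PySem

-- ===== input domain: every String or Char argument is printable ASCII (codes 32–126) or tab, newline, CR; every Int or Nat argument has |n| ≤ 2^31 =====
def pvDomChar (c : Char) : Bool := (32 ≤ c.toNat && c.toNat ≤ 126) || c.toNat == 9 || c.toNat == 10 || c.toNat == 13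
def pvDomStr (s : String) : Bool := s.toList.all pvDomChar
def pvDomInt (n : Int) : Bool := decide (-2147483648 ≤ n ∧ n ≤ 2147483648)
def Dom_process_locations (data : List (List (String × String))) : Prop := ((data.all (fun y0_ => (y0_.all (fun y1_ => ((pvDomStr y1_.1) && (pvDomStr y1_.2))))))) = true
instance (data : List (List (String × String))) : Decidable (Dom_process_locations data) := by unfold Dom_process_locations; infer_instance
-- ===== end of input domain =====

-- B replaces A's single pass over a dict of mutable sets by a filtered pair list,
-- an ordered dedup of departments and a per-department scan (alternative decomposition, not faster).

-- ===== PORT A =====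
-- case.get(k) on the dict 'case'
def pvAGet (case : List (String × String)) (k : String) : Option String :=
  (PySem.Dict.mk case).get? k

-- the body of A's 'for case in data' loop; 'if dept not in …: … = set()' followed by
-- 'locations[dept].add(city)' is Dict.modify with default Set.empty
def pvAStep (loc : PySem.Dict String (PySem.Set String)) (case : List (String × String)) :
    PySem.Dict String (PySem.Set String) :=
  let dept := pvAGet case "departamento_nom"
  let city := pvAGet case "ciudad_municipio_nom"
  match dept, city with
  | some d, some c =>
      if d ≠ "" && c ≠ "" then loc.modify d PySem.Set.empty (fun s => PySem.Set.add s c)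
      else loc
  | _, _ => loc

def process_locations (data : List (List (String × String))) : List (String × List String) :=
  let locations := data.foldl pvAStep PySem.Dict.empty
  locations.items.map (fun kv => (kv.1, PySem.List.sorted kv.2 (fun x => x) false))

-- ===== PORT B =====
-- the two comprehensions: raw pairs, then the truthiness filter
def pvBPairs (data : List (List (String × String))) : List (String × String) :=
  let raw := data.map (fun c =>
    ((PySem.Dict.mk c).get? "departamento_nom", (PySem.Dict.mk c).get? "ciudad_municipio_nom"))
  raw.filterMap (fun p =>
    match p with
    | (some d, some c) => if d ≠ "" && c ≠ "" then some (d, c) else none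
    | _ => none)

def process_locations_alt (data : List (List (String × String))) : List (String × List String) :=
  let pairs := pvBPairs data
  let depts := PySem.List.dedup (pairs.map (·.1))
  depts.map (fun d =>
    (d, PySem.List.sorted
          (PySem.Set.ofList ((pairs.filter (fun p => p.1 == d)).map (·.2)))
          (fun x => x) false))

-- ===== PRECONDITION & SPEC =====
def Spec_process_locations (data : List (List (String × String))) (out : List (String × List String)) : Prop := out = process_locations_alt data
instance (data : List (List (String × String))) (out : List (String × List String)) : Decidable (Spec_process_locations data out) := by unfold Spec_process_locations; infer_instance

-- ===== CLAIM (what is proved, stated in full; the proofs are below) =====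
def Claim_equal_process_locations : Prop := ∀ (data : List (List (String × String))), Dom_process_locations data → Spec_process_locations data (process_locations data)

-- ===== LEMMAS AND PROOFS =====

-- A's fold over the raw data equals the simple grouping fold over B's filtered pair list
theorem pvFold_eq (l : List (List (String × String))) (d : PySem.Dict String (PySem.Set String)) :
    l.foldl pvAStep d =
      (pvBPairs l).foldl
        (fun loc p => loc.modify p.1 PySem.Set.empty (fun s => PySem.Set.add s p.2)) d := by
  induction l generalizing d with
  | nil => rfl
  | cons c t ih =>
      simp only [List.foldl_cons, pvBPairs, List.map_cons, List.filterMap_cons] at *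
      rcases h1 : (PySem.Dict.mk c).get? "departamento_nom" with _ | dep <;>
        rcases h2 : (PySem.Dict.mk c).get? "ciudad_municipio_nom" with _ | ci <;>
        simp only [pvAStep, pvAGet, h1, h2] <;>
        first
        | exact ih d
        | (by_cases hif : (dep ≠ "" && ci ≠ "") = true <;>
            simp only [hif, if_true, Bool.not_eq_true] at * <;>
            exact ih _)

-- value of the grouping fold at a key
theorem pvFold_getD (ps : List (String × String)) (d : PySem.Dict String (PySem.Set String)) (k : String) :
    (ps.foldl (fun loc p => loc.modify p.1 PySem.Set.empty (fun s => PySem.Set.add s p.2)) d).getD k PySem.Set.empty =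
      ((ps.filter (fun p => p.1 == k)).map (·.2)).foldl PySem.Set.add (d.getD k PySem.Set.empty) := by
  induction ps generalizing d with
  | nil => rfl
  | cons p t ih =>
      simp only [List.foldl_cons, List.filter_cons]
      by_cases h : p.1 = k
      · simp only [h, BEq.rfl, if_true, List.map_cons, List.foldl_cons, ih,
          PySem.Dict.getD_modify]
      · have hbe : (p.1 == k) = false := by simp [h]
        simp only [hbe, Bool.false_eq_true, if_false, ih]
        rw [PySem.Dict.getD_modify]
        simp [Ne.symm h]

-- ===== VERDICT (by name: the statement is the Claim_ definition above) =====
theorem process_locations_spec : Claim_equal_process_locations := by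
  intro data _
  unfold Spec_process_locations process_locations process_locations_alt
  dsimp only
  rw [pvFold_eq]
  set ps := pvBPairs data with hps
  set F := (fun (loc : PySem.Dict String (PySem.Set String)) (p : String × String) =>
      loc.modify p.1 PySem.Set.empty (fun s => PySem.Set.add s p.2)) with hF
  have hnd : (ps.foldl F PySem.Dict.empty).keys.Nodup := by
    have := PySem.Dict.nodup_keys_foldl_modify_key ps (fun p => p.1) PySem.Set.empty
      (fun _ p => fun s => PySem.Set.add s p.2) PySem.Dict.empty PySem.Dict.nodup_keys_empty
    exact this
  have hkeys : (ps.foldl F PySem.Dict.empty).keys = PySem.List.dedup (ps.map (·.1)) := by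
    have := PySem.Dict.keys_foldl_modify_key ps (fun p => p.1) PySem.Set.empty
      (fun _ p => fun s => PySem.Set.add s p.2) PySem.Dict.empty
    rw [hF, this, PySem.Dict.keys_empty, PySem.List.dedup_eq_ofList, PySem.Set.ofList_eq_foldl]
    rfl
  rw [PySem.Dict.items_eq_map_keys _ hnd PySem.Set.empty, hkeys, List.map_map]
  refine List.map_congr_left fun k _ => ?_
  simp only [Function.comp]
  congr 1
  rw [pvFold_getD, PySem.Dict.getD_empty, PySem.Set.ofList_eq_foldl]
  rfl
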